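-- pv_equiv track=rewrite | github.com/pypi-data/pypi-mirror-390 | packages/osiris-pipeline/osiris_pipeline-0.5.7.tar.gz/osiris_pipeline-0.5.7/osiris/mcp/tools/memory.py | _is_secret_key
-- ===== SOURCE A (Python) =====
-- def _is_secret_key(key_name: str) -> bool:
--     """
--     Check if a key name represents a secret field.
--
--     Uses the same heuristics as connection_helpers.py for consistency.
--     Handles compound names like "service_role_key" and "api_key" correctly.
--
--     Args:
--         key_name: Field name to check
--
--     Returns:
--         True if the field should be redacted
--     """
--     # Common secret patterns (expanded from connection_helpers.py)
--     secret_patterns = {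
--         "password",
--         "passwd",
--         "pass",
--         "pwd",
--         "secret",
--         "key",
--         "token",
--         "auth",
--         "credential",
--         "api_key",
--         "apikey",
--         "access_token",
--         "refresh_token",
--         "private_key",
--         "client_secret",
--         "service_role_key",
--         "anon_key",
--         "access_key_id",
--         "secret_access_key",
--         "ssn",
--         "credit_card",
--         "card_number",
--     }
--
--     key_lower = key_name.lower()
--
--     # Exact match
--     if key_lower in secret_patterns:
--         return True
--
--     # Check for compound names with word boundary detection
--     for pattern in secret_patterns:
--         if pattern in key_lower:
--             # Check if it's at word boundaries (underscore-separated)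
--             parts = key_lower.split("_")
--             if pattern in parts or any(part.endswith(pattern) for part in parts):
--                 # Exclude known non-secrets like "primary_key"
--                 if "primary" in key_lower and pattern == "key":  # nosec B105  # Comparing field name pattern
--                     continue
--                 if "foreign" in key_lower and pattern == "key":  # nosec B105  # Comparing field name pattern
--                     continue
--                 return True
--
--     return False
-- ===== SOURCE B (Python) =====
-- # Re-implementation: split once, then test each part's suffixes against a set,
-- # instead of scanning all 22 patterns with substring + endswith per pattern.
-- _SINGLE_WORD_PATTERNS = frozenset({
--     "password", "passwd", "pass", "pwd", "secret", "key",
--     "token", "auth", "credential", "apikey", "ssn",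
-- })
--
-- _COMPOUND_PATTERNS = frozenset({
--     "api_key", "access_token", "refresh_token", "private_key", "client_secret",
--     "service_role_key", "anon_key", "access_key_id", "secret_access_key",
--     "credit_card", "card_number",
-- })
--
-- _ALL_PATTERNS = _SINGLE_WORD_PATTERNS | _COMPOUND_PATTERNS
--
-- # a suffix longer than the longest single-word pattern can never be in the set
-- _MAX_LEN = max(len(p) for p in _SINGLE_WORD_PATTERNS)
--
--
-- def _is_secret_key(key_name: str) -> bool:
--     key_lower = key_name.lower()
--     if key_lower in _ALL_PATTERNS:
--         return True
--     # "key" alone is not a secret in primary_key / foreign_key style names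
--     suppress_key = "primary" in key_lower or "foreign" in key_lower
--     for part in key_lower.split("_"):
--         start = len(part) - _MAX_LEN if len(part) > _MAX_LEN else 0
--         for i in range(start, len(part)):
--             suffix = part[i:]
--             if suffix in _SINGLE_WORD_PATTERNS and not (suffix == "key" and suppress_key):
--                 return True
--     return False
-- ===== Notes on version B (the rewrite author's own statement) =====
-- stated objective: faster
-- what changed: Instead of scanning all 22 patterns with a substring test plus a per-pattern endswith pass over the parts (re-splitting inside the loop), B splits once, precomputes the primary/foreign suppression flag, and for each part tests only its last-at-most-10 suffixes for membership in the single-word pattern set; compound (underscore) patterns are handled by the exact-match check alone, which is all A's loop ever does with them.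
import Mathlib
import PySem

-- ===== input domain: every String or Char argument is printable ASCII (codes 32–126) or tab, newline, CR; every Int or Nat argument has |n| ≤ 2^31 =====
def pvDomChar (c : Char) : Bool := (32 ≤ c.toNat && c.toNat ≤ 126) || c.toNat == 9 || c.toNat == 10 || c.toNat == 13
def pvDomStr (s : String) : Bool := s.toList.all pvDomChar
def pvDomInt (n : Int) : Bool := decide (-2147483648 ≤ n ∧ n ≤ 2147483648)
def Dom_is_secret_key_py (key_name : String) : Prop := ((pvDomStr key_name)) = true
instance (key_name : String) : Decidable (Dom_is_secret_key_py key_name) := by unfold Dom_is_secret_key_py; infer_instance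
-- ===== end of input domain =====

-- B replaces A's 22-pattern substring+endswith scan (with a re-split per pattern) by one split and a
-- per-part suffix walk against a set of single-word patterns; same return value, alternative algorithm.

-- ===== PORT A =====
-- A's secret_patterns set literal, in source order (Python iterates the set; the loop's result is
-- order-independent — it returns True iff SOME pattern passes — so iterating this list is faithful).
def pvPatternsA : List (List Char) :=
  ["password".toList, "passwd".toList, "pass".toList, "pwd".toList, "secret".toList,
   "key".toList, "token".toList, "auth".toList, "credential".toList, "api_key".toList,
   "apikey".toList, "access_token".toList, "refresh_token".toList, "private_key".toList,
   "client_secret".toList, "service_role_key".toList, "anon_key".toList,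
   "access_key_id".toList, "secret_access_key".toList, "ssn".toList,
   "credit_card".toList, "card_number".toList]

-- the 'for pattern in secret_patterns:' loop, with 'continue' as recursion on the rest
def pvLoopA (kl : List Char) : List (List Char) → Bool
  | [] => false
  | p :: rest =>
    if PySem.Chars.isIn p kl then
      let parts := PySem.Chars.splitOn kl ['_']
      if parts.contains p || parts.any (fun part => PySem.Chars.endswith part p) then
        if PySem.Chars.isIn "primary".toList kl && p == "key".toList then pvLoopA kl rest
        else if PySem.Chars.isIn "foreign".toList kl && p == "key".toList then pvLoopA kl rest
        else true
      else pvLoopA kl rest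
    else pvLoopA kl rest

def is_secret_key_py (key_name : String) : Bool :=
  let kl := PySem.Chars.lower key_name.toList
  if (PySem.Set.ofList pvPatternsA).contains kl then true
  else pvLoopA kl pvPatternsA

-- ===== PORT B =====
def pvSingles : List (List Char) :=
  ["password".toList, "passwd".toList, "pass".toList, "pwd".toList, "secret".toList,
   "key".toList, "token".toList, "auth".toList, "credential".toList, "apikey".toList,
   "ssn".toList]

def pvCompounds : List (List Char) :=
  ["api_key".toList, "access_token".toList, "refresh_token".toList, "private_key".toList,
   "client_secret".toList, "service_role_key".toList, "anon_key".toList,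
   "access_key_id".toList, "secret_access_key".toList, "credit_card".toList,
   "card_number".toList]

def pvSingleSet : PySem.Set (List Char) := PySem.Set.ofList pvSingles

-- Source B's _MAX_LEN = max(len(p) for p in _SINGLE_WORD_PATTERNS)
def pvMaxLen : Nat := (pvSingles.map List.length).foldr max 0

def pvAllSet : PySem.Set (List Char) :=
  PySem.Set.union pvSingleSet (PySem.Set.ofList pvCompounds)

-- Source B's inner 'for i in range(len(part)): suffix = part[i:] …' walk over the suffixes of a part
def pvSuffixHit (supp : Bool) : List Char → Bool
  | [] => false
  | c :: cs =>
      (pvSingleSet.contains (c :: cs) && !((c :: cs) == "key".toList && supp))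
      || pvSuffixHit supp cs

def is_secret_key_py_alt (key_name : String) : Bool :=
  let kl := PySem.Chars.lower key_name.toList
  if pvAllSet.contains kl then true
  else
    let supp := PySem.Chars.isIn "primary".toList kl || PySem.Chars.isIn "foreign".toList kl
    -- Source B walks the suffixes part[i:] for i in [max(0, len(part)-_MAX_LEN), len(part));
    -- these are exactly the nonempty suffixes of part.drop (part.length - pvMaxLen)
    -- (Nat subtraction is Python's max(0, len - _MAX_LEN))
    (PySem.Chars.splitOn kl ['_']).any (fun part =>
      pvSuffixHit supp (part.drop (part.length - pvMaxLen)))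

-- ===== PRECONDITION & SPEC =====
def Spec_is_secret_key_py (key_name : String) (out : Bool) : Prop := out = is_secret_key_py_alt key_name
instance (key_name : String) (out : Bool) : Decidable (Spec_is_secret_key_py key_name out) := by unfold Spec_is_secret_key_py; infer_instance

-- ===== CLAIM (what is proved, stated in full; the proofs are below) =====
def Claim_equal_is_secret_key_py : Prop := ∀ (key_name : String), Dom_is_secret_key_py key_name → Spec_is_secret_key_py key_name (is_secret_key_py key_name)

-- ===== LEMMAS AND PROOFS =====

-- structural characterization of Chars.splitOn on the single-character separator '_'
def pvSplitU : List Char → List (List Char)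
  | [] => [[]]
  | c :: rest =>
    if c = '_' then [] :: pvSplitU rest
    else match pvSplitU rest with
         | [] => [[c]]
         | h :: t => (c :: h) :: t

def pvConsHead (x : List Char) : List (List Char) → List (List Char)
  | [] => [x]
  | h :: t => (x ++ h) :: t

theorem pvSplitU_ne_nil (s : List Char) : pvSplitU s ≠ [] := by
  induction s with
  | nil => simp [pvSplitU]
  | cons c rest ih =>
    unfold pvSplitU
    split
    · simp
    · split
      · simp
      · simp

theorem pv_go_eq (fuel : Nat) : ∀ (l cur : List Char) (acc : List (List Char)),
    l.length < fuel →
    PySem.Chars.splitOn.go ['_'] fuel l cur acc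
      = acc.reverse ++ pvConsHead cur.reverse (pvSplitU l) := by
  induction fuel with
  | zero => intro l cur acc h; omega
  | succ n ih =>
    intro l cur acc h
    match l with
    | [] => simp [PySem.Chars.splitOn.go, pvSplitU, pvConsHead]
    | c :: rest =>
      rw [PySem.Chars.splitOn.go]
      by_cases hc : c = '_'
      · subst hc
        have hpre : List.isPrefixOf ['_'] ('_' :: rest) = true := by
          simp [List.isPrefixOf]
        simp only [hpre, if_pos]
        rw [ih]
        · cases hs : pvSplitU rest with
          | nil => exact absurd hs (pvSplitU_ne_nil rest)
          | cons hh t => simp [pvSplitU, pvConsHead, hs]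
        · simp at h ⊢; omega
      · have hpre : List.isPrefixOf ['_'] (c :: rest) = false := by
          simp [List.isPrefixOf]
          exact fun hh => hc hh.symm
        simp only [hpre]
        rw [if_neg (by simp)]
        rw [ih]
        · simp only [pvSplitU]
          rw [if_neg hc]
          cases hs : pvSplitU rest with
          | nil => exact absurd hs (pvSplitU_ne_nil rest)
          | cons hh t => simp [pvConsHead]
        · simp at h ⊢; omega

theorem pv_splitOn_eq (s : List Char) : PySem.Chars.splitOn s ['_'] = pvSplitU s := by
  unfold PySem.Chars.splitOn
  rw [pv_go_eq _ _ _ _ (by omega)]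
  cases hs : pvSplitU s with
  | nil => exact absurd hs (pvSplitU_ne_nil s)
  | cons h t => simp [pvConsHead]

theorem pv_parts_no_underscore (s : List Char) : ∀ part ∈ pvSplitU s, '_' ∉ part := by
  induction s with
  | nil => simp [pvSplitU]
  | cons c rest ih =>
    intro part hp
    unfold pvSplitU at hp
    by_cases hc : c = '_'
    · rw [if_pos hc] at hp
      rcases List.mem_cons.1 hp with h1 | h1
      · simp [h1]
      · exact ih part h1
    · rw [if_neg hc] at hp
      cases hs : pvSplitU rest with
      | nil => exact absurd hs (pvSplitU_ne_nil rest)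
      | cons hh t =>
        rw [hs] at hp
        rcases List.mem_cons.1 hp with h1 | h1
        · subst h1
          intro hmem
          rcases List.mem_cons.1 hmem with h2 | h2
          · exact hc h2.symm
          · exact ih hh (by simp [hs]) h2
        · exact ih part (by simp [hs, h1])

theorem pv_splitU_spec (s : List Char) :
    ∀ h t, pvSplitU s = h :: t → (h <+: s ∧ ∀ part ∈ t, part <:+: s) := by
  induction s with
  | nil => intro h t hs; simp [pvSplitU] at hs; simp [hs.1, hs.2]
  | cons c rest ih =>
    intro h t hs
    unfold pvSplitU at hs
    by_cases hc : c = '_'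
    · rw [if_pos hc] at hs
      cases hr : pvSplitU rest with
      | nil => exact absurd hr (pvSplitU_ne_nil rest)
      | cons h' t' =>
        rw [hr] at hs
        injection hs with e1 e2
        subst e1; subst e2
        refine ⟨List.nil_prefix, ?_⟩
        intro part hp
        have hro : rest <:+: c :: rest := (List.suffix_cons c rest).isInfix
        rcases List.mem_cons.1 hp with h1 | h1
        · exact h1 ▸ ((ih h' t' hr).1.isInfix).trans hro
        · exact ((ih h' t' hr).2 part h1).trans hro
    · rw [if_neg hc] at hs
      cases hr : pvSplitU rest with
      | nil => exact absurd hr (pvSplitU_ne_nil rest)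
      | cons h' t' =>
        rw [hr] at hs
        injection hs with e1 e2
        subst e1; subst e2
        have hro : rest <:+: c :: rest := (List.suffix_cons c rest).isInfix
        refine ⟨List.cons_prefix_cons.mpr ⟨rfl, (ih h' t' hr).1⟩, ?_⟩
        intro part hp
        exact ((ih h' t' hr).2 part hp).trans hro

theorem pv_part_infix (s part : List Char) (h : part ∈ pvSplitU s) : part <:+: s := by
  cases hs : pvSplitU s with
  | nil => exact absurd hs (pvSplitU_ne_nil s)
  | cons hh t =>
    rw [hs] at h
    rcases List.mem_cons.1 h with h1 | h1
    · exact h1 ▸ (pv_splitU_spec s hh t hs).1.isInfix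
    · exact (pv_splitU_spec s hh t hs).2 part h1

theorem pvLoopA_eq_any (kl : List Char) (pats : List (List Char)) :
    pvLoopA kl pats
      = pats.any (fun p =>
          PySem.Chars.isIn p kl
          && ((PySem.Chars.splitOn kl ['_']).contains p
              || (PySem.Chars.splitOn kl ['_']).any (fun part => PySem.Chars.endswith part p))
          && !((PySem.Chars.isIn "primary".toList kl || PySem.Chars.isIn "foreign".toList kl)
               && p == "key".toList)) := by
  induction pats with
  | nil => simp [pvLoopA]
  | cons p rest ih =>
    rw [List.any_cons, ← ih]
    simp only [pvLoopA]
    have h5 : ((PySem.Chars.isIn "primary".toList kl || PySem.Chars.isIn "foreign".toList kl)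
          && p == "key".toList)
        = ((PySem.Chars.isIn "primary".toList kl && p == "key".toList)
          || (PySem.Chars.isIn "foreign".toList kl && p == "key".toList)) := by
      cases PySem.Chars.isIn "primary".toList kl <;>
        cases PySem.Chars.isIn "foreign".toList kl <;>
        cases (p == "key".toList) <;> rfl
    rw [h5]
    cases h1 : PySem.Chars.isIn p kl <;>
      cases h2 : ((PySem.Chars.splitOn kl ['_']).contains p
          || (PySem.Chars.splitOn kl ['_']).any (fun part => PySem.Chars.endswith part p)) <;>
      cases h3 : (PySem.Chars.isIn "primary".toList kl && p == "key".toList) <;>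
      cases h4 : (PySem.Chars.isIn "foreign".toList kl && p == "key".toList) <;>
      simp [h1, h2, h3, h4]

-- the substring and exact-part checks are redundant given some part ends with p
theorem pv_condA_eq (kl p : List Char) :
    (PySem.Chars.isIn p kl
      && ((PySem.Chars.splitOn kl ['_']).contains p
          || (PySem.Chars.splitOn kl ['_']).any (fun part => PySem.Chars.endswith part p)))
      = (PySem.Chars.splitOn kl ['_']).any (fun part => PySem.Chars.endswith part p) := by
  cases hany : (PySem.Chars.splitOn kl ['_']).any (fun part => PySem.Chars.endswith part p) with
  | true =>
    obtain ⟨part, hmem, hend⟩ := List.any_eq_true.1 hany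
    have hinf : p <:+: kl := by
      have h1 : p <:+ part := (PySem.Chars.endswith_iff part p).1 hend
      have h2 : part <:+: kl := pv_part_infix kl part (pv_splitOn_eq kl ▸ hmem)
      exact h1.isInfix.trans h2
    have hin : PySem.Chars.isIn p kl = true := (PySem.Chars.isIn_iff_infix p kl).2 hinf
    simp [hin]
  | false =>
    have hnm : p ∉ PySem.Chars.splitOn kl ['_'] := by
      intro hmem
      have : (PySem.Chars.splitOn kl ['_']).any (fun part => PySem.Chars.endswith part p) = true :=
        List.any_eq_true.2 ⟨p, hmem, (PySem.Chars.endswith_iff p p).2 List.suffix_rfl⟩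
      simp [this] at hany
    simp [hnm]

theorem pv_underscore_dead (kl p : List Char) (h : '_' ∈ p) :
    (PySem.Chars.splitOn kl ['_']).any (fun part => PySem.Chars.endswith part p) = false := by
  rw [List.any_eq_false]
  intro part hmem
  simp only [Bool.not_eq_true]
  cases hend : PySem.Chars.endswith part p with
  | false => rfl
  | true =>
    have h1 : p <:+ part := (PySem.Chars.endswith_iff part p).1 hend
    have h2 : '_' ∉ part := pv_parts_no_underscore kl part (pv_splitOn_eq kl ▸ hmem)
    exact absurd (h1.subset h) h2

theorem pv_any_and_right {α : Type} (l : List α) (f : α → Bool) (b : Bool) :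
    (l.any f && b) = l.any (fun x => f x && b) := by
  rw [Bool.eq_iff_iff]
  simp only [List.any_eq_true, Bool.and_eq_true]
  tauto

theorem pv_any_swap {α β : Type} (l : List α) (m : List β) (g : α → β → Bool) :
    l.any (fun p => m.any (g p)) = m.any (fun q => l.any (fun p => g p q)) := by
  rw [Bool.eq_iff_iff]
  simp only [List.any_eq_true]
  tauto

theorem pv_any_or_and {α : Type} (l : List α) (f e g : α → Bool) :
    l.any (fun p => (f p || e p) && g p)
      = (l.any (fun p => f p && g p) || l.any (fun p => e p && g p)) := by
  rw [Bool.eq_iff_iff]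
  simp only [List.any_eq_true, Bool.or_eq_true, Bool.and_eq_true]
  aesop

theorem pv_any_beq {α : Type} [BEq α] [LawfulBEq α] (l : List α) (x : α) (f : α → Bool) :
    l.any (fun p => (p == x) && f p) = (l.contains x && f x) := by
  rw [Bool.eq_iff_iff]
  simp only [List.any_eq_true, Bool.and_eq_true, beq_iff_eq, List.contains_iff_mem]
  constructor
  · rintro ⟨p, hp, rfl, hf⟩; exact ⟨hp, hf⟩
  · rintro ⟨hx, hf⟩; exact ⟨x, hx, rfl, hf⟩

theorem pv_endswith_cons (c : Char) (cs p : List Char) :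
    PySem.Chars.endswith (c :: cs) p = ((p == c :: cs) || PySem.Chars.endswith cs p) := by
  rw [Bool.eq_iff_iff]
  simp only [Bool.or_eq_true, beq_iff_eq, PySem.Chars.endswith_iff, List.suffix_cons_iff]

theorem pv_sufHit_eq (supp : Bool) (part : List Char) :
    pvSuffixHit supp part
      = pvSingles.any (fun p => PySem.Chars.endswith part p && !(p == "key".toList && supp)) := by
  induction part with
  | nil => cases supp <;> decide
  | cons c cs ih =>
    have hset : pvSingleSet.contains (c :: cs) = pvSingles.contains (c :: cs) := by
      rw [PySem.Set.contains_eq_listContains]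
      rw [show pvSingleSet = PySem.Set.ofList pvSingles from rfl,
        PySem.Set.ofList_eq_self_of_nodup pvSingles (by decide)]
    simp only [pvSuffixHit, pv_endswith_cons, pv_any_or_and, pv_any_beq, ih, hset]

theorem pv_endswith_drop (s p : List Char) (hp : p.length ≤ 10) :
    PySem.Chars.endswith (s.drop (s.length - 10)) p = PySem.Chars.endswith s p := by
  rw [Bool.eq_iff_iff, PySem.Chars.endswith_iff, PySem.Chars.endswith_iff]
  constructor
  · intro h; exact h.trans (List.drop_suffix _ _)
  · rintro ⟨u, rfl⟩
    have hk : (u ++ p).length - 10 ≤ u.length := by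
      simp [List.length_append]; omega
    rw [List.drop_append_of_le_length hk]
    exact ⟨u.drop ((u ++ p).length - 10), rfl⟩

theorem pv_sufHit_drop_eq (supp : Bool) (part : List Char) :
    pvSuffixHit supp (part.drop (part.length - pvMaxLen))
      = pvSingles.any (fun p => PySem.Chars.endswith part p && !(p == "key".toList && supp)) := by
  rw [pv_sufHit_eq, show pvMaxLen = 10 from rfl]
  rw [Bool.eq_iff_iff]
  simp only [List.any_eq_true, Bool.and_eq_true]
  have hlen : ∀ p ∈ pvSingles, p.length ≤ 10 := by decide
  constructor
  · rintro ⟨p, hp, he, hg⟩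
    exact ⟨p, hp, by rw [← pv_endswith_drop part p (hlen p hp)]; exact he, hg⟩
  · rintro ⟨p, hp, he, hg⟩
    exact ⟨p, hp, by rw [pv_endswith_drop part p (hlen p hp)]; exact he, hg⟩

theorem pv_exact_eq (kl : List Char) :
    (PySem.Set.ofList pvPatternsA).contains kl = pvAllSet.contains kl := by
  rw [Bool.eq_iff_iff]
  have hperm : pvPatternsA.Perm (pvSingles ++ pvCompounds) := by decide
  simp only [PySem.Set.contains_iff, pvAllSet, pvSingleSet, PySem.Set.mem_union,
    PySem.Set.mem_ofList]
  rw [hperm.mem_iff, List.mem_append]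

theorem pv_main (kl : List Char) :
    pvLoopA kl pvPatternsA
      = (PySem.Chars.splitOn kl ['_']).any
          (fun part =>
            pvSuffixHit (PySem.Chars.isIn "primary".toList kl || PySem.Chars.isIn "foreign".toList kl)
              (part.drop (part.length - pvMaxLen))) := by
  rw [pvLoopA_eq_any]
  have hb : ∀ p : List Char,
      (PySem.Chars.isIn p kl
        && ((PySem.Chars.splitOn kl ['_']).contains p
            || (PySem.Chars.splitOn kl ['_']).any (fun part => PySem.Chars.endswith part p))
        && !((PySem.Chars.isIn "primary".toList kl || PySem.Chars.isIn "foreign".toList kl)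
             && p == "key".toList))
      = ((PySem.Chars.splitOn kl ['_']).any (fun part => PySem.Chars.endswith part p)
        && !((PySem.Chars.isIn "primary".toList kl || PySem.Chars.isIn "foreign".toList kl)
             && p == "key".toList)) := by
    intro p
    rw [pv_condA_eq]
  simp only [hb]
  have d1 := pv_underscore_dead kl "api_key".toList (by decide)
  have d2 := pv_underscore_dead kl "access_token".toList (by decide)
  have d3 := pv_underscore_dead kl "refresh_token".toList (by decide)
  have d4 := pv_underscore_dead kl "private_key".toList (by decide)
  have d5 := pv_underscore_dead kl "client_secret".toList (by decide)
  have d6 := pv_underscore_dead kl "service_role_key".toList (by decide)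
  have d7 := pv_underscore_dead kl "anon_key".toList (by decide)
  have d8 := pv_underscore_dead kl "access_key_id".toList (by decide)
  have d9 := pv_underscore_dead kl "secret_access_key".toList (by decide)
  have d10 := pv_underscore_dead kl "credit_card".toList (by decide)
  have d11 := pv_underscore_dead kl "card_number".toList (by decide)
  have hstep :
      pvPatternsA.any (fun p =>
        (PySem.Chars.splitOn kl ['_']).any (fun part => PySem.Chars.endswith part p)
        && !((PySem.Chars.isIn "primary".toList kl || PySem.Chars.isIn "foreign".toList kl)
             && p == "key".toList))
      = pvSingles.any (fun p =>
        (PySem.Chars.splitOn kl ['_']).any (fun part => PySem.Chars.endswith part p)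
        && !((PySem.Chars.isIn "primary".toList kl || PySem.Chars.isIn "foreign".toList kl)
             && p == "key".toList)) := by
    simp only [pvPatternsA, pvSingles, List.any_cons, List.any_nil,
      d1, d2, d3, d4, d5, d6, d7, d8, d9, d10, d11, Bool.false_and, Bool.or_false,
      Bool.false_or]
  rw [hstep]
  simp only [pv_any_and_right]
  rw [pv_any_swap]
  refine List.any_congr rfl ?_
  intro part
  rw [pv_sufHit_drop_eq]
  refine List.any_congr rfl ?_
  intro p
  rw [Bool.and_comm (PySem.Chars.isIn "primary".toList kl || PySem.Chars.isIn "foreign".toList kl) (p == "key".toList)]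

-- ===== VERDICT (by name: the statement is the Claim_ definition above) =====
theorem is_secret_key_py_spec : Claim_equal_is_secret_key_py := by
  intro key_name _
  unfold Spec_is_secret_key_py is_secret_key_py is_secret_key_py_alt
  simp only [pv_exact_eq, pv_main]
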